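-- pv_equiv track=rewrite | github.com/Nithin9Krishna/AI_Resume_Analyzer | src/skill_gap.py | canonicalize_skills
-- ===== SOURCE A (Python) =====
-- def canonicalize_skills(skill_candidates):
--     canonical = set()
--
--     for skill in skill_candidates:
--         s = skill.lower()
--
--         if "python" in s:
--             canonical.add("python")
--         elif "javascript" in s or "js" in s:
--             canonical.add("javascript")
--         elif "sql" in s:
--             canonical.add("sql")
--         elif "nosql" in s or "mongodb" in s:
--             canonical.add("nosql")
--         elif "aws" in s or "cloud" in s:
--             canonical.add("aws")
--         elif "docker" in s or "container" in s:
--             canonical.add("docker")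
--         elif "kubernetes" in s or "k8s" in s:
--             canonical.add("kubernetes")
--         elif "llm" in s or "language model" in s:
--             canonical.add("llms")
--         elif "generative ai" in s or "genai" in s:
--             canonical.add("generative ai")
--         elif "rag" in s:
--             canonical.add("rag")
--         elif "openai" in s:
--             canonical.add("openai")
--         elif "hugging" in s:
--             canonical.add("huggingface")
--         elif "fastapi" in s or "flask" in s:
--             canonical.add("api frameworks")
--         elif "react" in s or "vue" in s or "angular" in s:
--             canonical.add("frontend frameworks")
--
--     return canonical
-- ===== SOURCE B (Python) =====
-- KEYWORDS = [
--     (0, "python"), (1, "javascript"), (1, "js"), (2, "sql"),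
--     (3, "nosql"), (3, "mongodb"), (4, "aws"), (4, "cloud"),
--     (5, "docker"), (5, "container"), (6, "kubernetes"), (6, "k8s"),
--     (7, "llm"), (7, "language model"), (8, "generative ai"), (8, "genai"),
--     (9, "rag"), (10, "openai"), (11, "hugging"),
--     (12, "fastapi"), (12, "flask"),
--     (13, "react"), (13, "vue"), (13, "angular"),
-- ]
--
-- LABELS = [
--     "python", "javascript", "sql", "nosql", "aws", "docker", "kubernetes",
--     "llms", "generative ai", "rag", "openai", "huggingface",
--     "api frameworks", "frontend frameworks",
-- ]
--
--
-- def canonicalize_skills(skill_candidates):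
--     canonical = set()
--     for skill in skill_candidates:
--         s = skill.lower()
--         hits = [prio for prio, kw in KEYWORDS if kw in s]
--         if hits:
--             canonical.add(LABELS[min(hits)])
--     return canonical
-- ===== Notes on version B (the rewrite author's own statement) =====
-- stated objective: alternative
-- what changed: Instead of an ordered first-match elif chain, B matches each skill exhaustively against a flat (priority, keyword) table with no branch order or short-circuit, then selects the canonical label by indexing a label list with the minimum matched priority.
import Mathlib
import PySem

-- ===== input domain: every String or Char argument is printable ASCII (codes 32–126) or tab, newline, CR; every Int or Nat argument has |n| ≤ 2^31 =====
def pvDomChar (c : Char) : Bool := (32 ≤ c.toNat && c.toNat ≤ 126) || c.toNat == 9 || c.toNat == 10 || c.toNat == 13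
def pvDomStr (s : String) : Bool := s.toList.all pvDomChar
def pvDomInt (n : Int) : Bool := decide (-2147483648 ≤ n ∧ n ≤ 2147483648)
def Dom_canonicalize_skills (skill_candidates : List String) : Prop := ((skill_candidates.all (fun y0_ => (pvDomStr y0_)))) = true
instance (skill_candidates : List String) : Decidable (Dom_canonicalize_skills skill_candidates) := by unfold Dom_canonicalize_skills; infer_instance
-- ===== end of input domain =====

-- B replaces A's ordered first-match elif chain by exhaustive matching against a flat
-- (priority, keyword) table, selecting the label by min over matched priorities (alternative; same cost).


-- ===== PORT A =====
-- one iteration of A's loop body: s = skill.lower(); the elif chain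
def pvAStep (canonical : PySem.Set String) (skill : String) : PySem.Set String :=
  let s := PySem.Str.lower skill
  if PySem.Str.isIn "python" s then canonical.add "python"
  else if PySem.Str.isIn "javascript" s || PySem.Str.isIn "js" s then canonical.add "javascript"
  else if PySem.Str.isIn "sql" s then canonical.add "sql"
  else if PySem.Str.isIn "nosql" s || PySem.Str.isIn "mongodb" s then canonical.add "nosql"
  else if PySem.Str.isIn "aws" s || PySem.Str.isIn "cloud" s then canonical.add "aws"
  else if PySem.Str.isIn "docker" s || PySem.Str.isIn "container" s then canonical.add "docker"
  else if PySem.Str.isIn "kubernetes" s || PySem.Str.isIn "k8s" s then canonical.add "kubernetes"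
  else if PySem.Str.isIn "llm" s || PySem.Str.isIn "language model" s then canonical.add "llms"
  else if PySem.Str.isIn "generative ai" s || PySem.Str.isIn "genai" s then canonical.add "generative ai"
  else if PySem.Str.isIn "rag" s then canonical.add "rag"
  else if PySem.Str.isIn "openai" s then canonical.add "openai"
  else if PySem.Str.isIn "hugging" s then canonical.add "huggingface"
  else if PySem.Str.isIn "fastapi" s || PySem.Str.isIn "flask" s then canonical.add "api frameworks"
  else if PySem.Str.isIn "react" s || PySem.Str.isIn "vue" s || PySem.Str.isIn "angular" s then canonical.add "frontend frameworks"
  else canonical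

def canonicalize_skills (skill_candidates : List String) : List String :=
  skill_candidates.foldl pvAStep PySem.Set.empty

-- ===== PORT B =====
-- the flat (priority, keyword) table of Source B
def pvKeywords : List (Int × String) :=
  [ (0, "python"), (1, "javascript"), (1, "js"), (2, "sql"),
    (3, "nosql"), (3, "mongodb"), (4, "aws"), (4, "cloud"),
    (5, "docker"), (5, "container"), (6, "kubernetes"), (6, "k8s"),
    (7, "llm"), (7, "language model"), (8, "generative ai"), (8, "genai"),
    (9, "rag"), (10, "openai"), (11, "hugging"),
    (12, "fastapi"), (12, "flask"),
    (13, "react"), (13, "vue"), (13, "angular") ]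

-- the LABELS list of Source B
def pvLabels : List String :=
  [ "python", "javascript", "sql", "nosql", "aws", "docker", "kubernetes",
    "llms", "generative ai", "rag", "openai", "huggingface",
    "api frameworks", "frontend frameworks" ]

-- one iteration of Source B's loop body: exhaustive matching, then min over matched priorities;
-- LABELS[min(hits)] is ported with pyGetD (total form of indexing; the index is provably in range)
def pvBStep (canonical : PySem.Set String) (skill : String) : PySem.Set String :=
  let s := PySem.Str.lower skill
  let hits := (pvKeywords.filter (fun t => PySem.Str.isIn t.2 s)).map Prod.fst
  match PySem.List.min? hits (fun x => x) with
  | none => canonical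
  | some i => canonical.add (PySem.List.pyGetD pvLabels i "")

def canonicalize_skills_alt (skill_candidates : List String) : List String :=
  skill_candidates.foldl pvBStep PySem.Set.empty

-- ===== PRECONDITION & SPEC =====
def Spec_canonicalize_skills (skill_candidates : List String) (out : List String) : Prop := out = canonicalize_skills_alt skill_candidates
instance (skill_candidates : List String) (out : List String) : Decidable (Spec_canonicalize_skills skill_candidates out) := by unfold Spec_canonicalize_skills; infer_instance

-- ===== CLAIM (what is proved, stated in full; the proofs are below) =====
def Claim_equal_canonicalize_skills : Prop := ∀ (skill_candidates : List String), Dom_canonicalize_skills skill_candidates → Spec_canonicalize_skills skill_candidates (canonicalize_skills skill_candidates)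

-- ===== LEMMAS AND PROOFS =====

-- proof-side view of the rules: ordered groups of keywords with their canonical label
def pvRules : List (List String × String) :=
  [ (["python"], "python"),
    (["javascript", "js"], "javascript"),
    (["sql"], "sql"),
    (["nosql", "mongodb"], "nosql"),
    (["aws", "cloud"], "aws"),
    (["docker", "container"], "docker"),
    (["kubernetes", "k8s"], "kubernetes"),
    (["llm", "language model"], "llms"),
    (["generative ai", "genai"], "generative ai"),
    (["rag"], "rag"),
    (["openai"], "openai"),
    (["hugging"], "huggingface"),
    (["fastapi", "flask"], "api frameworks"),
    (["react", "vue", "angular"], "frontend frameworks") ]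

-- first-match scan over the rules (the common middle form both ports are reduced to)
def pvScan (rules : List (List String × String)) (canonical : PySem.Set String) (s : String) : PySem.Set String :=
  match rules with
  | [] => canonical
  | (subs, label) :: rest =>
      if subs.any (fun sub => PySem.Str.isIn sub s) then canonical.add label
      else pvScan rest canonical s

-- flattening of the rules into the (priority, keyword) table, starting at priority k
def pvFlat (k : Int) : List (List String × String) → List (Int × String)
  | [] => []
  | (subs, _) :: rest => subs.map (fun kw => (k, kw)) ++ pvFlat (k + 1) rest

theorem pvKeywords_eq : pvKeywords = pvFlat 0 pvRules := by decide

-- every matched priority coming from pvFlat k is ≥ k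
theorem pvFlat_hits_ge (rules : List (List String × String)) (k : Int) (s : String) :
    ∀ y ∈ ((pvFlat k rules).filter (fun t => PySem.Str.isIn t.2 s)).map Prod.fst, k ≤ y := by
  induction rules generalizing k with
  | nil => intro y hy; simp [pvFlat] at hy
  | cons r rest ih =>
      intro y hy
      obtain ⟨subs, label⟩ := r
      simp only [pvFlat, List.filter_append, List.map_append, List.mem_append] at hy
      rcases hy with hy | hy
      · simp only [List.mem_map, List.mem_filter] at hy
        obtain ⟨t, ht, rfl⟩ := hy
        obtain ⟨kw, _, hkw⟩ := ht.1
        rw [← hkw]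
      · have := ih (k + 1) y hy
        omega

-- foldl min over a list whose elements are all ≥ the seed gives the seed
theorem pvFoldl_min_eq (t : List Int) (x : Int) (h : ∀ y ∈ t, x ≤ y) : t.foldl min x = x := by
  induction t generalizing x with
  | nil => rfl
  | cons a t ih =>
      simp only [List.foldl_cons]
      have hx : min x a = x := min_eq_left (h a (List.mem_cons_self))
      rw [hx]
      exact ih x (fun y hy => h y (List.mem_cons_of_mem _ hy))

-- B's loop body over the flattened table equals the first-match scan over the rules
theorem pvScan_eq (rules : List (List String × String)) (k : Int) (s : String)
    (canonical : PySem.Set String)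
    (h : ∀ j : Nat, j < rules.length →
      PySem.List.pyGetD pvLabels (k + (j : Int)) "" = (rules.getD j ([], "")).2) :
    (match PySem.List.min? (((pvFlat k rules).filter (fun t => PySem.Str.isIn t.2 s)).map Prod.fst) (fun x => x) with
     | none => canonical
     | some i => canonical.add (PySem.List.pyGetD pvLabels i ""))
    = pvScan rules canonical s := by
  induction rules generalizing k with
  | nil => simp [pvFlat, pvScan, PySem.List.min?]
  | cons r rest ih =>
      obtain ⟨subs, label⟩ := r
      have hfront : ((List.map (fun kw => (k, kw)) subs).filter (fun t => PySem.Str.isIn t.2 s)).map Prod.fst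
          = (subs.filter (fun kw => PySem.Str.isIn kw s)).map (fun _ => k) := by
        rw [List.filter_map, List.map_map]
        rfl
      by_cases hm : subs.any (fun sub => PySem.Str.isIn sub s)
      · -- some keyword of the first rule matches: hits = k :: t with every element of t ≥ k
        obtain ⟨kw, hkw, hin⟩ := List.any_eq_true.mp hm
        have hne : subs.filter (fun kw => PySem.Str.isIn kw s) ≠ [] := by
          intro hnil
          have : kw ∈ subs.filter (fun kw => PySem.Str.isIn kw s) :=
            List.mem_filter.mpr ⟨hkw, hin⟩
          rw [hnil] at this
          exact absurd this (List.not_mem_nil)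
        obtain ⟨hd, tl, heq⟩ := List.exists_cons_of_ne_nil hne
        simp only [pvFlat, List.filter_append, List.map_append, hfront, heq, List.map_cons,
          List.cons_append]
        rw [PySem.List.min?_id_cons]
        have hmin : ((List.map (fun _ => k) tl) ++
            ((pvFlat (k + 1) rest).filter (fun t => PySem.Str.isIn t.2 s)).map Prod.fst).foldl min k = k := by
          apply pvFoldl_min_eq
          intro y hy
          rcases List.mem_append.mp hy with hy | hy
          · obtain ⟨_, _, rfl⟩ := List.mem_map.mp hy
            exact le_refl k
          · have := pvFlat_hits_ge rest (k + 1) s y hy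
            omega
        rw [hmin]
        have h0 : PySem.List.pyGetD pvLabels k "" = label := by simpa using h 0 (by simp)
        simp only [pvScan]
        rw [if_pos hm, ← h0]
      · -- no keyword of the first rule matches: its filter contribution is empty
        have hnil : subs.filter (fun kw => PySem.Str.isIn kw s) = [] := by
          rw [List.filter_eq_nil_iff]
          intro kw hkw hin
          exact hm (List.any_eq_true.mpr ⟨kw, hkw, hin⟩)
        simp only [pvFlat, List.filter_append, List.map_append, hfront, hnil, List.map_nil,
          List.nil_append]
        rw [ih (k + 1) (fun j hj => by
          have := h (j + 1) (by simpa using Nat.succ_lt_succ hj)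
          simpa [add_assoc, add_comm, add_left_comm] using this)]
        simp only [pvScan]
        rw [if_neg hm]

-- one loop iteration of A equals the first-match scan over pvRules (branch-by-branch)
theorem pvAStep_eq_scan (canonical : PySem.Set String) (skill : String) :
    pvAStep canonical skill = pvScan pvRules canonical (PySem.Str.lower skill) := by
  unfold pvAStep
  simp only [pvRules, pvScan, List.any_cons, List.any_nil, Bool.or_false, Bool.or_assoc]

-- one loop iteration of B equals the same scan
theorem pvBStep_eq_scan (canonical : PySem.Set String) (skill : String) :
    pvBStep canonical skill = pvScan pvRules canonical (PySem.Str.lower skill) := by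
  unfold pvBStep
  rw [pvKeywords_eq]
  exact pvScan_eq pvRules 0 (PySem.Str.lower skill) canonical (by decide)

-- ===== VERDICT (by name: the statement is the Claim_ definition above) =====
theorem canonicalize_skills_spec : Claim_equal_canonicalize_skills := by
  intro skill_candidates _
  unfold Spec_canonicalize_skills canonicalize_skills canonicalize_skills_alt
  rw [show pvAStep = pvBStep from
    funext fun c => funext fun sk => (pvAStep_eq_scan c sk).trans (pvBStep_eq_scan c sk).symm]
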